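-- pv_equiv track=rewrite | github.com/blindsphynx/TextAlignment | src/TextAlignment.py | alignmentRight
-- ===== SOURCE A (Python) =====
-- def alignmentRight(widthFormattedText, textWidth):
--     localWidthFormattedText = list(widthFormattedText)
--     for i in range(len(localWidthFormattedText)):
--         line = localWidthFormattedText[i]
--         while line[-1] == ' ':
--             line = ' ' + line[:-1]
--
--         while len(line) < textWidth:
--             line = ' ' + line
--
--         localWidthFormattedText[i] = line
--     return localWidthFormattedText
-- ===== SOURCE B (Python) =====
-- def alignmentRight(widthFormattedText, textWidth):
--     result = []
--     for line in widthFormattedText: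
--         stripped = line.rstrip(' ')
--         k = len(line) - len(stripped)
--         pad = max(textWidth - len(line), 0)
--         result.append(' ' * (pad + k) + stripped)
--     return result
-- ===== Notes on version B (the rewrite author's own statement) =====
-- stated objective: faster
-- what changed: Replaces the two character-by-character while loops (rotating each trailing space to the front one at a time, then prepending padding one space at a time) with a single direct construction: count trailing spaces via rstrip and build the result as one padding block plus the stripped content.
import Mathlib
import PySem

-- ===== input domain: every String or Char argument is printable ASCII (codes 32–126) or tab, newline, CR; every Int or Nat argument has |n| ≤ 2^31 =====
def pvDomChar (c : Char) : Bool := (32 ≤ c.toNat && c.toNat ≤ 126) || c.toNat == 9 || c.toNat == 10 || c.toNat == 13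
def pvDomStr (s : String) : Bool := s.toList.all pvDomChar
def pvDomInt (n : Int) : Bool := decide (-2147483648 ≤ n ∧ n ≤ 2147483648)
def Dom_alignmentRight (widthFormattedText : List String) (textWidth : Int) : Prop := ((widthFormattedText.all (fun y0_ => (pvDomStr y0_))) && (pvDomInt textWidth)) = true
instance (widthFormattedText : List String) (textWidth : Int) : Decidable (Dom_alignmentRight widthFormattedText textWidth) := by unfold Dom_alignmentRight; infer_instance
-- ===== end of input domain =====

-- B builds each output line directly (one padding block + stripped content) instead of
-- A's two character-at-a-time while loops; proved equal on lines containing a non-space.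

-- ===== PORT A =====
-- inner loop `while line[-1] == ' ': line = ' ' + line[:-1]`, fuel-bounded:
-- on every input admitted by Pre_ (some non-space char) the loop runs at most
-- (length of the line) times, so fuel = length is exact; on all-space lines Python diverges.
def pvRotA : Nat → List Char → List Char
  | 0, l => l
  | fuel + 1, l =>
      if l.getLast? = some ' ' then pvRotA fuel (' ' :: l.dropLast) else l

-- `while len(line) < textWidth: line = ' ' + line`
def pvPadA (textWidth : Int) (l : List Char) : List Char :=
  if h : (l.length : Int) < textWidth then pvPadA textWidth (' ' :: l) else l
termination_by (textWidth - l.length).toNat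
decreasing_by simp only [List.length_cons]; omega

def alignmentRight (widthFormattedText : List String) (textWidth : Int) : List String :=
  widthFormattedText.map (fun line =>
    String.mk (pvPadA textWidth (pvRotA line.toList.length line.toList)))

-- ===== PORT B =====
-- line.rstrip(' ') ported as reverse/dropWhile/reverse (exact for the single-char strip set)
def pvRstripSp (l : List Char) : List Char := (l.reverse.dropWhile (fun c => c == ' ')).reverse

def alignmentRight_alt (widthFormattedText : List String) (textWidth : Int) : List String :=
  widthFormattedText.map (fun line =>
    let l := line.toList
    let stripped := pvRstripSp l
    let k : Int := (l.length : Int) - (stripped.length : Int)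
    let pad : Int := max (textWidth - (l.length : Int)) 0
    String.mk (List.replicate (pad + k).toNat ' ' ++ stripped))

-- ===== PRECONDITION & SPEC =====
-- Pre_ excludes exactly the inputs on which Python A never returns: a line that is empty
-- (line[-1] raises IndexError) or consists only of spaces (the first while loop diverges).
def Pre_alignmentRight (widthFormattedText : List String) (textWidth : Int) : Prop :=
  ∀ s ∈ widthFormattedText, s.toList.any (fun c => !(c == ' ')) = true
instance (widthFormattedText : List String) (textWidth : Int) : Decidable (Pre_alignmentRight widthFormattedText textWidth) := by unfold Pre_alignmentRight; infer_instance

def pvWitness_alignmentRight : List String × Int := (["ab  ", " x "], 6)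

def Spec_alignmentRight (widthFormattedText : List String) (textWidth : Int) (out : List String) : Prop := out = alignmentRight_alt widthFormattedText textWidth
instance (widthFormattedText : List String) (textWidth : Int) (out : List String) : Decidable (Spec_alignmentRight widthFormattedText textWidth out) := by unfold Spec_alignmentRight; infer_instance

-- ===== CLAIM (what is proved, stated in full; the proofs are below) =====
def Claim_equal_alignmentRight : Prop := ∀ (widthFormattedText : List String) (textWidth : Int), Dom_alignmentRight widthFormattedText textWidth → Pre_alignmentRight widthFormattedText textWidth → Spec_alignmentRight widthFormattedText textWidth (alignmentRight widthFormattedText textWidth)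

-- ===== LEMMAS AND PROOFS =====

-- the rotation loop moves the k trailing spaces to the front, given enough fuel
theorem pvRotA_eq (k : Nat) (m : List Char) (fuel : Nat)
    (hm : m ≠ []) (hlast : m.getLast? ≠ some ' ') (hf : k ≤ fuel) :
    pvRotA fuel (m ++ List.replicate k ' ') = List.replicate k ' ' ++ m := by
  induction k generalizing m fuel with
  | zero =>
      simp only [List.replicate, List.append_nil, List.nil_append]
      cases fuel with
      | zero => rfl
      | succ f => simp [pvRotA, hlast]
  | succ n ih =>
      cases fuel with
      | zero => omega
      | succ f =>
        have hguard : (m ++ List.replicate (n + 1) ' ').getLast? = some ' ' := by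
          simp [List.getLast?_append, List.getLast?_replicate]
        have hdrop : (m ++ List.replicate (n + 1) ' ').dropLast = m ++ List.replicate n ' ' := by
          rw [List.dropLast_append_of_ne_nil (by simp)]
          simp [List.dropLast_replicate]
        have hstep : ' ' :: (m ++ List.replicate n ' ') = (' ' :: m) ++ List.replicate n ' ' := by
          simp
        have hlast' : (' ' :: m).getLast? ≠ some ' ' := by
          cases m with
          | nil => exact absurd rfl hm
          | cons a t => simpa [List.getLast?_cons_cons] using hlast
        have := ih (' ' :: m) f (by simp) hlast' (by omega)
        simp only [pvRotA, hguard, hdrop, hstep, this]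
        rw [show List.replicate (n + 1) ' ' = List.replicate n ' ' ++ [' '] by
          simp [List.replicate_succ']]
        simp

-- the padding loop prepends exactly (textWidth - length)⁺ spaces
theorem pvPadA_eq (textWidth : Int) (l : List Char) :
    pvPadA textWidth l = List.replicate (textWidth - l.length).toNat ' ' ++ l := by
  generalize hn : (textWidth - l.length).toNat = n
  induction n generalizing l with
  | zero =>
      rw [pvPadA]
      rw [dif_neg (by omega)]
      simp
  | succ n ih =>
      rw [pvPadA]
      rw [dif_pos (by omega)]
      rw [ih (' ' :: l) (by simp; omega)]
      rw [show List.replicate (n + 1) ' ' = List.replicate n ' ' ++ [' '] by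
        simp [List.replicate_succ']]
      simp

-- decomposition of a line with a non-space char: l = stripped ++ replicate k ' '
theorem pv_decomp (l : List Char) (h : l.any (fun c => !(c == ' ')) = true) :
    l = pvRstripSp l ++ List.replicate (l.length - (pvRstripSp l).length) ' ' ∧
    pvRstripSp l ≠ [] ∧ (pvRstripSp l).getLast? ≠ some ' ' := by
  unfold pvRstripSp
  have hsplit := (List.takeWhile_append_dropWhile (p := fun c => c == ' ') (l := l.reverse)).symm
  have htake : l.reverse.takeWhile (fun c => c == ' ')
      = List.replicate ((l.reverse.takeWhile (fun c => c == ' ')).length) ' ' := by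
    apply List.eq_replicate_of_mem
    intro c hc
    have := List.mem_takeWhile_imp hc
    simpa using this
  have hd : l.reverse.dropWhile (fun c => c == ' ') ≠ [] := by
    intro hnil
    have : ∀ c ∈ l.reverse, c = ' ' := by
      intro c hc
      rw [hsplit] at hc
      rcases List.mem_append.mp hc with h1 | h1
      · simpa using List.mem_takeWhile_imp h1
      · rw [hnil] at h1; simp at h1
    rcases List.any_eq_true.mp h with ⟨c, hc, hcne⟩
    have := this c (by simpa using hc)
    simp [this] at hcne
  refine ⟨?_, by simpa using hd, ?_⟩
  · conv_lhs => rw [← l.reverse_reverse, hsplit]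
    rw [htake]
    rw [List.reverse_append, List.reverse_replicate]
    congr 1
    have hlen : l.length = (l.reverse.takeWhile (fun c => c == ' ')).length
        + (l.reverse.dropWhile (fun c => c == ' ')).length := by
      have := congrArg List.length hsplit
      simp only [List.length_reverse, List.length_append] at this
      omega
    simp only [List.length_reverse]
    congr 1
    omega
  · rw [List.getLast?_reverse]
    have hhead := List.head?_dropWhile_not (p := fun c => c == ' ') (l := l.reverse)
    intro hcontra
    rw [hcontra] at hhead
    simp at hhead

-- per-line agreement
theorem pv_line_eq (s : String) (textWidth : Int)
    (h : s.toList.any (fun c => !(c == ' ')) = true) :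
    String.mk (pvPadA textWidth (pvRotA s.toList.length s.toList)) =
    String.mk (List.replicate ((max (textWidth - (s.toList.length : Int)) 0
        + ((s.toList.length : Int) - ((pvRstripSp s.toList).length : Int))).toNat) ' '
        ++ pvRstripSp s.toList) := by
  obtain ⟨hdec, hne, hlast⟩ := pv_decomp s.toList h
  set m := pvRstripSp s.toList with hm
  set k := s.toList.length - m.length with hk
  have hklen : m.length + k = s.toList.length := by
    have := congrArg List.length hdec
    simp only [List.length_append, List.length_replicate] at this
    omega
  have hrot : pvRotA s.toList.length s.toList = List.replicate k ' ' ++ m := by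
    have h0 := pvRotA_eq k m s.toList.length hne hlast (by omega)
    rw [← hdec] at h0
    exact h0
  rw [hrot, pvPadA_eq]
  rw [← List.append_assoc, ← List.replicate_add]
  have hc : (textWidth - ((List.replicate k ' ' ++ m).length : Int)).toNat + k
      = (max (textWidth - (s.toList.length : Int)) 0
          + ((s.toList.length : Int) - (m.length : Int))).toNat := by
    simp only [List.length_append, List.length_replicate]
    omega
  rw [hc]

theorem alignmentRight_spec : Claim_equal_alignmentRight := by
  intro ws tw _ hpre
  unfold Spec_alignmentRight alignmentRight alignmentRight_alt
  apply List.map_congr_left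
  intro s hs
  exact pv_line_eq s tw (hpre s hs)
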